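-- pv_equiv track=rewrite | github.com/Yash3561/cua_pdf_reader | utils/vlm_processor.py | _tokens_to_paragraph
-- ===== SOURCE A (Python) =====
-- from typing import Dict, List, Optional, Tuple
--
-- def _tokens_to_paragraph(tokens: List[str]) -> str:
--     if not tokens:
--         return ""
--     paragraphs = []
--     current = []
--     for token in tokens:
--         if token == "\n":
--             if current:
--                 paragraphs.append(" ".join(current))
--                 current = []
--             continue
--         current.append(token)
--     if current:
--         paragraphs.append(" ".join(current))
--     return "\n".join([p.strip() for p in paragraphs if p.strip()])
-- ===== SOURCE B (Python) =====
-- from typing import List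
--
-- def _tokens_to_paragraph(tokens: List[str]) -> str:
--     # Scan by segments between "\n" markers with two indices; strip-join each
--     # segment and keep the non-empty ones. No flush accumulator needed.
--     results = []
--     i = 0
--     n = len(tokens)
--     while i < n:
--         j = i
--         while j < n and tokens[j] != "\n":
--             j += 1
--         p = " ".join(tokens[i:j]).strip()
--         if p:
--             results.append(p)
--         i = j + 1
--     return "\n".join(results)
-- ===== Notes on version B (the rewrite author's own statement) =====
-- stated objective: alternative
-- what changed: Replaced A's token-by-token flush-accumulator loop (current/paragraphs lists with flush-on-newline and a final flush) by a two-index segment scan: an inner scan finds the end of each run between "\n" markers, the run is sliced, joined, stripped and kept only if non-empty.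
import Mathlib
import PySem

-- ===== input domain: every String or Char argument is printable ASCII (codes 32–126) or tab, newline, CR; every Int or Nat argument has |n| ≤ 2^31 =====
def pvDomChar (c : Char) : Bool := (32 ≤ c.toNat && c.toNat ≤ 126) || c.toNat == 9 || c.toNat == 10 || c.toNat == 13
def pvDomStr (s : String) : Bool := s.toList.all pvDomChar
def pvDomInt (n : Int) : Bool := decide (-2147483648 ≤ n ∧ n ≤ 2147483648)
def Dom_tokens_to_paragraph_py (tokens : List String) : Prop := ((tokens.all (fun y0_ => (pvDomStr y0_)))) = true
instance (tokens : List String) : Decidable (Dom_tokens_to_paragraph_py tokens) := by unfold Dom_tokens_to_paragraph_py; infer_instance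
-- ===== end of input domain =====

-- B replaces A's flush-accumulator loop by a two-index segment scan between "\n"
-- markers (alternative decomposition, same O(n) cost).

-- ===== PORT A =====
def tokens_to_paragraph_py (tokens : List String) : String :=
  if tokens = [] then ""
  else
    let st := tokens.foldl
      (fun (s : List String × List String) token =>
        if token = "\n" then
          if s.2 ≠ [] then (s.1 ++ [PySem.Str.join " " s.2], ([] : List String)) else s
        else (s.1, s.2 ++ [token])) (([] : List String), ([] : List String))
    let paragraphs := if st.2 ≠ [] then st.1 ++ [PySem.Str.join " " st.2] else st.1
    PySem.Str.join "\n"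
      ((paragraphs.filter (fun p => PySem.Str.strip p ≠ "")).map PySem.Str.strip)

-- ===== PORT B =====
-- inner 'while j < n and tokens[j] != "\n": j += 1' (index always in range, so getD is exact)
def altScan (tokens : List String) (n j : Nat) : Nat :=
  if _h : j < n then
    if tokens.getD j "" ≠ "\n" then altScan tokens n (j + 1) else j
  else j
termination_by n - j

theorem altScan_ge (tokens : List String) (n j : Nat) : j ≤ altScan tokens n j := by
  unfold altScan
  split
  · split
    · have := altScan_ge tokens n (j + 1)
      omega
    · exact le_refl j
  · exact le_refl j
termination_by n - j

-- outer 'while i < n' loop of Source B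
def altLoop (tokens : List String) (n i : Nat) (results : List String) : List String :=
  if _h : i < n then
    let j := altScan tokens n i
    let p := PySem.Str.strip (PySem.Str.join " " (PySem.List.slice tokens (some (i : Int)) (some (j : Int))))
    altLoop tokens n (j + 1) (if p ≠ "" then results ++ [p] else results)
  else results
termination_by n - i
decreasing_by
  have := altScan_ge tokens n i
  omega

def tokens_to_paragraph_py_alt (tokens : List String) : String :=
  PySem.Str.join "\n" (altLoop tokens tokens.length 0 [])

-- ===== PRECONDITION & SPEC =====
def Spec_tokens_to_paragraph_py (tokens : List String) (out : String) : Prop := out = tokens_to_paragraph_py_alt tokens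
instance (tokens : List String) (out : String) : Decidable (Spec_tokens_to_paragraph_py tokens out) := by unfold Spec_tokens_to_paragraph_py; infer_instance

-- ===== CLAIM (what is proved, stated in full; the proofs are below) =====
def Claim_equal_tokens_to_paragraph_py : Prop := ∀ (tokens : List String), Dom_tokens_to_paragraph_py tokens → Spec_tokens_to_paragraph_py tokens (tokens_to_paragraph_py tokens)

-- ===== LEMMAS AND PROOFS =====

-- Bool form of 'is not a newline token'
def pNL (y : String) : Bool := decide (y ≠ "\n")

-- segments of the token list between "\n" markers (possibly empty segments)
def segsOf : List String → List (List String)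
  | [] => [[]]
  | x :: xs =>
    if x = "\n" then [] :: segsOf xs
    else
      match segsOf xs with
      | [] => [[x]]
      | s :: ss => (x :: s) :: ss

-- what one segment contributes to the result list
def segVal (seg : List String) : Option String :=
  let p := PySem.Str.strip (PySem.Str.join " " seg)
  if p ≠ "" then some p else none

-- A's accumulator loop, as a recursion emitting finished runs
def flushRuns : List String → List String → List (List String)
  | cur, [] => if cur = [] then [] else [cur]
  | cur, t :: ts =>
    if t = "\n" then (if cur = [] then [] else [cur]) ++ flushRuns [] ts
    else flushRuns (cur ++ [t]) ts

theorem segsOf_ne_nil (l : List String) : segsOf l ≠ [] := by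
  cases l with
  | nil => simp [segsOf]
  | cons x xs =>
    simp only [segsOf]
    split
    · simp
    · split <;> simp_all

theorem segsOf_span (l : List String) :
    segsOf l = (l.takeWhile pNL) ::
      (match l.dropWhile pNL with
       | [] => ([] : List (List String))
       | _ :: r => segsOf r) := by
  induction l with
  | nil => simp [segsOf]
  | cons x xs ih =>
    by_cases hx : x = "\n"
    · simp [segsOf, hx, pNL]
    · have hs := segsOf_ne_nil xs
      simp only [segsOf, if_neg hx]
      cases h : segsOf xs with
      | nil => exact absurd h hs
      | cons s ss =>
        rw [h] at ih
        have h1 : s = xs.takeWhile pNL := by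
          have := ih
          injection this
        have h2 : ss = (match xs.dropWhile pNL with
          | [] => ([] : List (List String))
          | _ :: r => segsOf r) := by injection ih
        simp [pNL, hx, h1, h2]

-- characterization of the inner scan
theorem altScan_eq (tokens : List String) :
    ∀ k i, tokens.length - i ≤ k →
      altScan tokens tokens.length i = i + ((tokens.drop i).takeWhile pNL).length := by
  intro k
  induction k with
  | zero =>
    intro i hi
    have hge : tokens.length ≤ i := by omega
    rw [altScan]
    rw [List.drop_eq_nil_of_le hge]
    simp
    omega
  | succ k ih =>
    intro i hi
    by_cases h : i < tokens.length
    · have hdrop : tokens.drop i = tokens[i] :: tokens.drop (i + 1) :=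
        List.drop_eq_getElem_cons h
      have hgetD : tokens.getD i "" = tokens[i] := List.getD_eq_getElem tokens "" h
      rw [altScan]
      rw [dif_pos h, hgetD]
      by_cases hnl : tokens[i] = "\n"
      · rw [if_neg (by simp [hnl])]
        rw [hdrop, List.takeWhile_cons, if_neg (by simp [pNL, hnl])]
        simp
      · rw [if_pos hnl]
        rw [ih (i + 1) (by omega)]
        rw [hdrop, List.takeWhile_cons, if_pos (by simp [pNL, hnl])]
        simp
        omega
    · rw [altScan]
      rw [dif_neg h]
      rw [List.drop_eq_nil_of_le (by omega)]
      simp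

-- characterization of B's outer loop
theorem altLoop_eq (tokens : List String) :
    ∀ k i res, tokens.length - i ≤ k →
      altLoop tokens tokens.length i res = res ++ (segsOf (tokens.drop i)).filterMap segVal := by
  intro k
  induction k with
  | zero =>
    intro i res hi
    have hge : tokens.length ≤ i := by omega
    rw [altLoop, dif_neg (by omega)]
    rw [List.drop_eq_nil_of_le hge]
    simp [segsOf, segVal]
    decide
  | succ k ih =>
    intro i res hi
    by_cases h : i < tokens.length
    · obtain ⟨L, hL⟩ : ∃ L, ((tokens.drop i).takeWhile pNL).length = L := ⟨_, rfl⟩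
      have hscan : altScan tokens tokens.length i = i + L := by
        rw [altScan_eq tokens (k + 1) i hi, hL]
      have hLle : i + L ≤ tokens.length := by
        have hle := (List.takeWhile_prefix (l := tokens.drop i) pNL).length_le
        rw [hL, List.length_drop] at hle
        omega
      have htw : (tokens.drop i).take L = (tokens.drop i).takeWhile pNL := by
        have hpre : (tokens.drop i).takeWhile pNL <+: tokens.drop i := List.takeWhile_prefix pNL
        rw [← hL]
        exact (List.prefix_iff_eq_take.mp hpre).symm
      have hslice : PySem.List.slice tokens (some (i : Int)) (some ((i + L : Nat) : Int))
          = (tokens.drop i).takeWhile pNL := by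
        rw [PySem.List.slice_natCast, Nat.add_sub_cancel_left]
        exact htw
      have hrest : tokens.drop (i + L + 1) = ((tokens.drop i).dropWhile pNL).drop 1 := by
        have hdd : tokens.drop (i + L + 1) = (tokens.drop i).drop (L + 1) := by
          rw [List.drop_drop]
          ring_nf
        rw [hdd]
        conv_lhs => rw [← List.takeWhile_append_dropWhile (p := pNL) (l := tokens.drop i)]
        rw [show L + 1 = ((tokens.drop i).takeWhile pNL).length + 1 by omega]
        exact List.drop_length_add_append 1
      rw [altLoop, dif_pos h]
      simp only [hscan, hslice]
      rw [ih (i + L + 1) _ (by omega)]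
      rw [segsOf_span (tokens.drop i), List.filterMap_cons]
      have htail : (segsOf (tokens.drop (i + L + 1))).filterMap segVal
          = (match (tokens.drop i).dropWhile pNL with
             | [] => ([] : List (List String))
             | _ :: r => segsOf r).filterMap segVal := by
        rw [hrest]
        cases hdw2 : (tokens.drop i).dropWhile pNL with
        | nil =>
          simp [segsOf, segVal]
          decide
        | cons d r => simp
      rw [htail]
      by_cases hp : PySem.Str.strip (PySem.Str.join " " ((tokens.drop i).takeWhile pNL)) ≠ ""
      · have hsv : segVal ((tokens.drop i).takeWhile pNL)
            = some (PySem.Str.strip (PySem.Str.join " " ((tokens.drop i).takeWhile pNL))) := by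
          simp [segVal, hp]
        rw [if_pos hp, hsv]
        simp
      · have hsv : segVal ((tokens.drop i).takeWhile pNL) = none := by
          simp [segVal]
          simpa using hp
        rw [if_neg hp, hsv]
    · rw [altLoop, dif_neg h]
      rw [List.drop_eq_nil_of_le (by omega)]
      simp [segsOf, segVal]
      decide

-- A's fold equals flushRuns
theorem foldA_eq (toks : List String) :
    ∀ ps cur,
      (let st := toks.foldl
        (fun (s : List String × List String) token =>
          if token = "\n" then
            if s.2 ≠ [] then (s.1 ++ [PySem.Str.join " " s.2], ([] : List String)) else s
          else (s.1, s.2 ++ [token])) (ps, cur);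
       if st.2 ≠ [] then st.1 ++ [PySem.Str.join " " st.2] else st.1)
      = ps ++ (flushRuns cur toks).map (PySem.Str.join " ") := by
  induction toks with
  | nil =>
    intro ps cur
    simp only [List.foldl_nil, flushRuns]
    by_cases hc : cur = [] <;> simp [hc]
  | cons t ts ih =>
    intro ps cur
    rw [List.foldl_cons]
    by_cases ht : t = "\n"
    · subst ht
      by_cases hc : cur = []
      · subst hc
        have hstep : (if ("\n" : String) = "\n" then
              if (ps, ([] : List String)).2 ≠ [] then
                ((ps, ([] : List String)).1 ++ [PySem.Str.join " " (ps, ([] : List String)).2], ([] : List String))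
              else (ps, ([] : List String))
            else ((ps, ([] : List String)).1, (ps, ([] : List String)).2 ++ ["\n"]))
            = (ps, ([] : List String)) := by
          simp
        rw [hstep, flushRuns]
        rw [if_pos rfl, if_pos rfl, List.nil_append]
        exact ih ps []
      · have hstep : (if ("\n" : String) = "\n" then
              if (ps, cur).2 ≠ [] then ((ps, cur).1 ++ [PySem.Str.join " " (ps, cur).2], ([] : List String))
              else (ps, cur)
            else ((ps, cur).1, (ps, cur).2 ++ ["\n"]))
            = (ps ++ [PySem.Str.join " " cur], ([] : List String)) := by
          simp [hc]
        rw [hstep, flushRuns]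
        rw [if_pos rfl, if_neg hc]
        rw [ih (ps ++ [PySem.Str.join " " cur]) []]
        simp
    · have hstep : (if t = "\n" then
            if (ps, cur).2 ≠ [] then ((ps, cur).1 ++ [PySem.Str.join " " (ps, cur).2], ([] : List String))
            else (ps, cur)
          else ((ps, cur).1, (ps, cur).2 ++ [t])) = (ps, cur ++ [t]) := by
        simp [ht]
      rw [hstep, flushRuns]
      rw [if_neg ht]
      exact ih ps (cur ++ [t])

-- flushRuns drops exactly the empty segments
theorem flushRuns_eq_segs (l : List String) :
    ∀ cur s ss, segsOf l = s :: ss →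
      flushRuns cur l = ((cur ++ s) :: ss).filter (fun r => decide (r ≠ [])) := by
  induction l with
  | nil =>
    intro cur s ss h
    simp [segsOf] at h
    obtain ⟨h1, h2⟩ := h
    subst h1; subst h2
    by_cases hc : cur = [] <;> simp [flushRuns, hc]
  | cons x xs ih =>
    intro cur s ss h
    by_cases hx : x = "\n"
    · simp only [segsOf, if_pos hx] at h
      injection h with h1 h2
      subst h1; subst h2
      cases h2 : segsOf xs with
      | nil => exact absurd h2 (segsOf_ne_nil xs)
      | cons s' ss' =>
        simp only [flushRuns, if_pos hx]
        rw [ih [] s' ss' h2]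
        by_cases hc : cur = [] <;> simp [hc]
    · have hs := segsOf_ne_nil xs
      simp only [segsOf, if_neg hx] at h
      cases h2 : segsOf xs with
      | nil => exact absurd h2 hs
      | cons s' ss' =>
        rw [h2] at h
        injection h with ha hb
        subst hb
        simp only [flushRuns, if_neg hx]
        rw [ih (cur ++ [x]) s' ss' h2]
        rw [← ha]
        simp

-- filter-nonempty, join, strip, filter-nonblank, map-strip = filterMap segVal
theorem filtmap_eq (ss : List (List String)) :
    ((((ss.filter (fun r => decide (r ≠ []))).map (PySem.Str.join " ")).filter
        (fun p => decide (PySem.Str.strip p ≠ ""))).map PySem.Str.strip)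
      = ss.filterMap segVal := by
  induction ss with
  | nil => rfl
  | cons s rest ih =>
    by_cases hs : s = []
    · subst hs
      rw [List.filterMap_cons]
      have : segVal ([] : List String) = none := by decide
      rw [this]
      simpa using ih
    · rw [List.filter_cons, if_pos (by simpa using hs)]
      rw [List.map_cons, List.filter_cons, List.filterMap_cons]
      by_cases hp : PySem.Str.strip (PySem.Str.join " " s) ≠ ""
      · rw [if_pos (by simpa using hp)]
        have : segVal s = some (PySem.Str.strip (PySem.Str.join " " s)) := by
          simp [segVal, hp]
        rw [this, List.map_cons, ih]
      · rw [if_neg (by simpa using hp)]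
        have : segVal s = none := by simp [segVal]; simpa using hp
        rw [this, ih]

-- ===== VERDICT (by name: the statement is the Claim_ definition above) =====
theorem tokens_to_paragraph_py_spec : Claim_equal_tokens_to_paragraph_py := by
  intro tokens _
  unfold Spec_tokens_to_paragraph_py tokens_to_paragraph_py tokens_to_paragraph_py_alt
  by_cases h0 : tokens = []
  · subst h0
    rw [if_pos rfl, altLoop]
    simp
    decide
  · rw [if_neg h0]
    have hA := foldA_eq tokens ([] : List String) ([] : List String)
    simp only [List.nil_append] at hA
    have hchain : ((((flushRuns [] tokens).map (PySem.Str.join " ")).filter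
          (fun p => decide (PySem.Str.strip p ≠ ""))).map PySem.Str.strip)
        = altLoop tokens tokens.length 0 [] := by
      cases hseg : segsOf tokens with
      | nil => exact absurd hseg (segsOf_ne_nil tokens)
      | cons s ss =>
        rw [flushRuns_eq_segs tokens [] s ss hseg, List.nil_append, ← hseg, filtmap_eq]
        rw [altLoop_eq tokens tokens.length 0 [] (by omega)]
        simp
    exact (congrArg (fun l => PySem.Str.join "\n"
        ((l.filter (fun p => decide (PySem.Str.strip p ≠ ""))).map PySem.Str.strip)) hA).trans
      (congrArg (PySem.Str.join "\n") hchain)
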